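-- pv_equiv track=rewrite | github.com/lewang2333/Onsight-Internal-Tools | 3ds_max_output_handler/rawparser.py | itemParser
-- ===== SOURCE A (Python) =====
-- def itemParser(data):
--     """
--     itype: String, raw data from input file
--     rtype: List[String], item list
--     """
--     itemList = []
--     item = None
--     for line in data.strip().split('\n'):
--         if line.startswith('id'):
--             item = [line]
--         elif line == '' and item:
--             itemList.append('\n'.join(item))
--             item = None
--         elif item:
--             item.append(line)
--     if item:
--         itemList.append('\n'.join(item))
--     return itemList
-- ===== SOURCE B (Python) =====
-- def itemParser(data):
--     """
--     itype: String, raw data from input file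
--     rtype: List[String], item list
--     """
--     # Phase 1: group lines into paragraphs, breaking on exactly-empty lines.
--     paragraphs = []
--     current = []
--     for line in data.strip().split('\n'):
--         if line == '':
--             if current:
--                 paragraphs.append(current)
--                 current = []
--         else:
--             current.append(line)
--     if current:
--         paragraphs.append(current)
--     # Phase 2: each paragraph yields the lines from its LAST 'id' line on, if any.
--     result = []
--     for para in paragraphs:
--         idx = None
--         for i, line in enumerate(para):
--             if line.startswith('id'):
--                 idx = i
--         if idx is not None:
--             result.append('\n'.join(para[idx:]))
--     return result
-- ===== Notes on version B (the rewrite author's own statement) =====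
-- stated objective: alternative
-- what changed: A's single pass with a mutable current-item state is replaced by a two-phase decomposition: first group lines into paragraphs split on exactly-empty lines, then emit each paragraph's suffix from the last line starting with 'id' (skipping paragraphs without one).
import Mathlib
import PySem

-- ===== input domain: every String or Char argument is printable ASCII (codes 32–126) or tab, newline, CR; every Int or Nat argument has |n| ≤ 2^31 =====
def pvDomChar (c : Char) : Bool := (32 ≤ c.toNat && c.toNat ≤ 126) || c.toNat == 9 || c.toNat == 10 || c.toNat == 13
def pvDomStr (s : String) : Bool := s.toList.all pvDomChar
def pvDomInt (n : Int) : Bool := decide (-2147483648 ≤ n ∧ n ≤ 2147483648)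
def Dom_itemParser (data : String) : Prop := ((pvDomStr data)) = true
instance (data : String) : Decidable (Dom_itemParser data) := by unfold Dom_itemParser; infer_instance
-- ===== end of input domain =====

-- B replaces A's single stateful pass by a two-phase decomposition (group lines into
-- paragraphs on empty lines, then take each paragraph's suffix from its last 'id' line);
-- objective: alternative (same cost, clearer structure), proved equal on all inputs.

-- ===== PORT A =====
-- Python's `item` is None or a nonempty list; both are falsy exactly when the list is
-- empty and `item` is never an empty list, so it is modelled as List String with [] for None.
def pvAStep (st : List String × List String) (line : String) : List String × List String :=
  if PySem.Str.startswith line "id" then (st.1, [line])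
  else if line = "" ∧ st.2 ≠ [] then (st.1 ++ [PySem.Str.join "\n" st.2], [])
  else if st.2 ≠ [] then (st.1, st.2 ++ [line])
  else st

def itemParser (data : String) : List String :=
  -- data.strip().split('\n'); the separator "\n" is non-empty so split? never returns none
  let lines := (PySem.Str.split? (PySem.Str.strip data) "\n").getD []
  let st := lines.foldl pvAStep ([], [])
  if st.2 ≠ [] then st.1 ++ [PySem.Str.join "\n" st.2] else st.1

-- ===== PORT B =====
-- phase 1 step: break the running paragraph on an exactly-empty line
def pvBGroupStep (st : List (List String) × List String) (line : String) :
    List (List String) × List String :=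
  if line = "" then (if st.2 ≠ [] then (st.1 ++ [st.2], []) else st)
  else (st.1, st.2 ++ [line])

-- phase 2 inner scan: index of the LAST line of the paragraph starting with 'id'
-- (zipIdx pairs each line with its 0-based position, as Python's enumerate does)
def pvBScan (para : List String) : Option Nat :=
  para.zipIdx.foldl (fun acc p => if PySem.Str.startswith p.1 "id" then some p.2 else acc) none

-- phase 2 step: para[idx:] for a non-negative idx is List.drop idx
def pvBPara (res : List String) (para : List String) : List String :=
  match pvBScan para with
  | some i => res ++ [PySem.Str.join "\n" (para.drop i)]
  | none => res

def itemParser_alt (data : String) : List String :=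
  let lines := (PySem.Str.split? (PySem.Str.strip data) "\n").getD []
  let gp := lines.foldl pvBGroupStep ([], [])
  let paragraphs := if gp.2 ≠ [] then gp.1 ++ [gp.2] else gp.1
  paragraphs.foldl pvBPara []

-- ===== PRECONDITION & SPEC =====
def Spec_itemParser (data : String) (out : List String) : Prop := out = itemParser_alt data
instance (data : String) (out : List String) : Decidable (Spec_itemParser data out) := by unfold Spec_itemParser; infer_instance

-- ===== CLAIM (what is proved, stated in full; the proofs are below) =====
def Claim_equal_itemParser : Prop := ∀ (data : String), Dom_itemParser data → Spec_itemParser data (itemParser data)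

-- ===== LEMMAS AND PROOFS =====

-- A's `item` as a function of the paragraph accumulated so far: suffix from the last 'id' line
def pvG : List String → List String
  | [] => []
  | l :: ls => if pvG ls ≠ [] then pvG ls else if PySem.Str.startswith l "id" then l :: ls else []

-- a paragraph's contribution to the output
def pvEmit (para : List String) : List String :=
  if pvG para ≠ [] then [PySem.Str.join "\n" (pvG para)] else []

lemma pvG_snoc_id (c : List String) (l : String) (h : PySem.Str.startswith l "id" = true) :
    pvG (c ++ [l]) = [l] := by
  simp at h
  induction c with
  | nil => simp [pvG, h]
  | cons x c ih => simp [pvG, ih]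

lemma pvG_snoc_not (c : List String) (l : String) (h : ¬ PySem.Str.startswith l "id" = true) :
    pvG (c ++ [l]) = if pvG c ≠ [] then pvG c ++ [l] else [] := by
  simp at h
  induction c with
  | nil => simp [pvG, h]
  | cons x c ih =>
    by_cases hc : pvG c = []
    · simp only [pvG, hc, List.cons_append, ih]
      split_ifs <;> simp_all
    · have h1 : pvG (c ++ [l]) = pvG c ++ [l] := by simp [ih, hc]
      simp [pvG, h1, hc]

lemma pvBScan_snoc (c : List String) (l : String) :
    pvBScan (c ++ [l]) =
      if PySem.Str.startswith l "id" = true then some c.length else pvBScan c := by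
  simp [pvBScan, List.zipIdx_append, List.foldl_append]

lemma pvBScan_char (para : List String) :
    (pvBScan para = none ∧ pvG para = []) ∨
    ∃ i, pvBScan para = some i ∧ i ≤ para.length ∧ pvG para = para.drop i ∧ pvG para ≠ [] := by
  induction para using List.reverseRecOn with
  | nil => exact Or.inl ⟨rfl, rfl⟩
  | append_singleton c l ih =>
    by_cases h : PySem.Str.startswith l "id" = true
    · refine Or.inr ⟨c.length, ?_, by simp, ?_, by simp [pvG_snoc_id c l h]⟩
      · rw [pvBScan_snoc, if_pos h]
      · simp [pvG_snoc_id c l h]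
    · rw [pvBScan_snoc c l, if_neg h]
      rcases ih with ⟨hs, hg⟩ | ⟨i, hs, hi, hg, hne⟩
      · exact Or.inl ⟨hs, by simp [pvG_snoc_not c l h, hg]⟩
      · refine Or.inr ⟨i, hs, by simp; omega, ?_, ?_⟩
        · rw [pvG_snoc_not c l h, if_pos hne, hg, List.drop_append_of_le_length hi]
        · rw [pvG_snoc_not c l h, if_pos hne]; simp

lemma pvBPara_eq (res para : List String) : pvBPara res para = res ++ pvEmit para := by
  rcases pvBScan_char para with ⟨hs, hg⟩ | ⟨i, hs, hi, hg, hne⟩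
  · simp [pvBPara, hs, pvEmit, hg]
  · have hlt : i < para.length := by
      rcases Nat.lt_or_ge i para.length with h' | h'
      · exact h'
      · exact absurd (List.drop_eq_nil_of_le h') (hg ▸ hne)
    simp only [pvBPara, hs]
    rw [pvEmit, if_pos hne, hg]

-- the grouping fold only appends to its first component
lemma pvGroup_fst (ls : List String) (ps : List (List String)) (cur : List String) :
    ls.foldl pvBGroupStep (ps, cur) =
      (ps ++ (ls.foldl pvBGroupStep ([], cur)).1, (ls.foldl pvBGroupStep ([], cur)).2) := by
  induction ls generalizing ps cur with
  | nil => simp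
  | cons l ls ih =>
    rw [List.foldl_cons, List.foldl_cons]
    by_cases hl : l = ""
    · by_cases hc : cur = []
      · rw [show pvBGroupStep (ps, cur) l = (ps, cur) by simp [pvBGroupStep, hl, hc],
            show pvBGroupStep ([], cur) l = ([], cur) by simp [pvBGroupStep, hl, hc]]
        exact ih ps cur
      · rw [show pvBGroupStep (ps, cur) l = (ps ++ [cur], []) by simp [pvBGroupStep, hl, hc],
            show pvBGroupStep ([], cur) l = ([cur], []) by simp [pvBGroupStep, hl, hc]]
        rw [ih (ps ++ [cur]) [], ih [cur] []]
        simp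
    · rw [show pvBGroupStep (ps, cur) l = (ps, cur ++ [l]) by simp [pvBGroupStep, hl],
          show pvBGroupStep ([], cur) l = ([], cur ++ [l]) by simp [pvBGroupStep, hl]]
      exact ih ps (cur ++ [l])

def pvBFin (gp : List (List String) × List String) : List (List String) :=
  if gp.2 ≠ [] then gp.1 ++ [gp.2] else gp.1

lemma pvBFin_pre (ps : List (List String)) (q : List (List String) × List String) :
    pvBFin (ps ++ q.1, q.2) = ps ++ pvBFin q := by
  by_cases h : q.2 = [] <;> simp [pvBFin, h]

lemma pvG_ne_nil {cur : List String} (h : pvG cur ≠ []) : cur ≠ [] := by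
  intro hc; exact h (by simp [hc, pvG])

-- A's trailing flush, as a function
def pvAFin (st : List String × List String) : List String :=
  if st.2 ≠ [] then st.1 ++ [PySem.Str.join "\n" st.2] else st.1

lemma pv_main (ls : List String) (acc cur : List String) :
    pvAFin (ls.foldl pvAStep (acc, pvG cur))
    = acc ++ (pvBFin (ls.foldl pvBGroupStep ([], cur))).flatMap pvEmit := by
  induction ls generalizing acc cur with
  | nil =>
    by_cases hc : cur = []
    · simp [hc, pvG, pvBFin, pvAFin]
    · by_cases hg : pvG cur = [] <;> simp [pvAFin, pvBFin, hc, hg, pvEmit]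
  | cons l ls ih =>
    simp only [List.foldl_cons]
    by_cases hid : PySem.Str.startswith l "id" = true
    · have hl : l ≠ "" := fun h => absurd (h ▸ hid) (by decide)
      have hA : pvAStep (acc, pvG cur) l = (acc, [l]) := by
        unfold pvAStep; rw [if_pos hid]
      rw [hA, show ((acc, [l]) : List String × List String) = (acc, pvG (cur ++ [l])) by
            rw [pvG_snoc_id cur l hid],
          show pvBGroupStep ([], cur) l = ([], cur ++ [l]) by simp [pvBGroupStep, hl]]
      exact ih acc (cur ++ [l])
    · by_cases hl : l = ""
      · by_cases hg : pvG cur = []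
        · have hA : pvAStep (acc, pvG cur) l = (acc, pvG cur) := by
            unfold pvAStep
            rw [if_neg hid, if_neg (by simp [hg]), if_neg (by simp [hg])]
          rw [hA, hg]
          by_cases hc : cur = []
          · rw [show pvBGroupStep ([], cur) l = ([], []) by simp [pvBGroupStep, hl, hc]]
            simpa [pvG] using ih acc ([] : List String)
          · rw [show pvBGroupStep ([], cur) l = ([cur], []) by simp [pvBGroupStep, hl, hc]]
            rw [pvGroup_fst ls [cur] [], pvBFin_pre, List.flatMap_append, List.flatMap_cons,
                List.flatMap_nil, List.append_nil,
                show pvEmit cur = [] by simp [pvEmit, hg], List.nil_append]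
            simpa [pvG] using ih acc ([] : List String)
        · have hc : cur ≠ [] := pvG_ne_nil hg
          have hA : pvAStep (acc, pvG cur) l =
              (acc ++ [PySem.Str.join "\n" (pvG cur)], []) := by
            unfold pvAStep; rw [if_neg hid, if_pos ⟨hl, hg⟩]
          rw [hA, show pvBGroupStep ([], cur) l = ([cur], []) by simp [pvBGroupStep, hl, hc]]
          rw [pvGroup_fst ls [cur] [], pvBFin_pre, List.flatMap_append, List.flatMap_cons,
              List.flatMap_nil, List.append_nil,
              show pvEmit cur = [PySem.Str.join "\n" (pvG cur)] by simp [pvEmit, hg]]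
          have h2 := ih (acc ++ [PySem.Str.join "\n" (pvG cur)]) ([] : List String)
          simp only [pvG] at h2
          rw [h2, List.append_assoc]
      · have hA : pvAStep (acc, pvG cur) l = (acc, pvG (cur ++ [l])) := by
          unfold pvAStep
          rw [if_neg hid, if_neg (by simp [hl]), pvG_snoc_not cur l hid]
          by_cases hg : pvG cur = []
          · rw [if_neg (by simp [hg]), if_neg (by simp [hg]), hg]
          · rw [if_pos hg, if_pos hg]
        rw [hA, show pvBGroupStep ([], cur) l = ([], cur ++ [l]) by simp [pvBGroupStep, hl]]
        exact ih acc (cur ++ [l])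

-- ===== VERDICT (by name: the statement is the Claim_ definition above) =====
theorem itemParser_spec : Claim_equal_itemParser := by
  intro data _
  unfold Spec_itemParser itemParser itemParser_alt
  have hfold : ∀ (ps : List (List String)) (init : List String),
      ps.foldl pvBPara init = init ++ ps.flatMap pvEmit := by
    intro ps init
    have : pvBPara = fun res para => res ++ pvEmit para := by
      funext res para; exact pvBPara_eq res para
    rw [this, PySem.List.foldl_append_eq_flatMap]
  simp only [hfold, List.nil_append]
  have key := pv_main ((PySem.Str.split? (PySem.Str.strip data) "\n").getD []) [] []
  simpa [pvG, pvBFin, pvAFin] using key
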